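-- pv_equiv track=rewrite | github.com/TametVonFarencjusz/NonogramPrinter | Board.py | tomyvector
-- ===== SOURCE A (Python) =====
-- def tomyvector(vec):
--     list = []
--     last = -1
--     for ele in vec:
--         if ele == 0 and last != 0:
--             #list.append(0)
--             last = 0
--         elif ele == 1 and last != 1:
--             list.append(1)
--             last = 1
--         elif ele == 1 and last == 1:
--             list[-1] += 1
--             last = 1
--     if len(list) == 0:
--         list.append(0)
--     return list
-- ===== SOURCE B (Python) =====
-- def tomyvector(vec):
--     # Two-pass, group-oriented: keep only 0/1 (other values are transparent
--     # and must not split runs), then scan maximal equal groups and record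
--     # the lengths of the 1-groups.
--     filtered = [e for e in vec if e == 0 or e == 1]
--     out = []
--     rest = filtered
--     while rest:
--         head = rest[0]
--         run = 1
--         while run < len(rest) and rest[run] == head:
--             run += 1
--         if head == 1:
--             out.append(run)
--         rest = rest[run:]
--     return out if out else [0]
-- ===== Notes on version B (the rewrite author's own statement) =====
-- stated objective: alternative
-- what changed: Replaced A's single-pass last-state machine (append/increment the trailing counter) with a two-phase structure: filter the vector to its 0/1 elements (other values are transparent in A), then scan maximal equal groups and collect the lengths of the 1-groups.
import Mathlib
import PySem

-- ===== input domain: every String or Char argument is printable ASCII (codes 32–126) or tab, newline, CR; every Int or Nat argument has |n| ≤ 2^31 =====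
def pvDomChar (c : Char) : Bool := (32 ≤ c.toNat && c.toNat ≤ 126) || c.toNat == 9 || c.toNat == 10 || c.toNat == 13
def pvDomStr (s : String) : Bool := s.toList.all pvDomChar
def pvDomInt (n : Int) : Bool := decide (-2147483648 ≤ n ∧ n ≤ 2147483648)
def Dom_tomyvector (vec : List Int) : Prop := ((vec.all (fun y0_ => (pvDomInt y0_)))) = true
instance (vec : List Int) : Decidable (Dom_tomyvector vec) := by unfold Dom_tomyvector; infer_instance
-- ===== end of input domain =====

-- B re-groups the 0/1-filtered vector into maximal equal runs instead of A's
-- last-state single pass; objective: alternative decomposition, same cost.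

-- ===== PORT A =====
-- list[-1] += 1 (the list is nonempty whenever that branch runs in A)
def pvIncLast : List Int → List Int
  | [] => []
  | [x] => [x + 1]
  | x :: t => x :: pvIncLast t

def pvStepA (st : List Int × Int) (ele : Int) : List Int × Int :=
  if ele = 0 ∧ st.2 ≠ 0 then (st.1, 0)
  else if ele = 1 ∧ st.2 ≠ 1 then (st.1 ++ [1], 1)
  else if ele = 1 ∧ st.2 = 1 then (pvIncLast st.1, 1)
  else st

def tomyvector (vec : List Int) : List Int :=
  let st := vec.foldl pvStepA ([], -1)
  if st.1.length = 0 then st.1 ++ [0] else st.1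

-- ===== PORT B =====
-- the inner while loop: length of the maximal leading run equal to head,
-- then slice the rest off; recursion = B's outer while loop
def pvGroupRuns : List Int → List Int
  | [] => []
  | h :: t =>
    let run : Nat := 1 + (t.takeWhile (fun x => x == h)).length
    let rest := t.dropWhile (fun x => x == h)
    if h = 1 then (run : Int) :: pvGroupRuns rest else pvGroupRuns rest
termination_by l => l.length
decreasing_by
  all_goals simpa using Nat.lt_succ_of_le (t.dropWhile_sublist (p := fun x => x == h)).length_le

def tomyvector_alt (vec : List Int) : List Int :=
  let filtered := vec.filter (fun e => e = 0 ∨ e = 1)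
  let out := pvGroupRuns filtered
  if out = [] then [0] else out

-- ===== PRECONDITION & SPEC =====
def Spec_tomyvector (vec : List Int) (out : List Int) : Prop := out = tomyvector_alt vec
instance (vec : List Int) (out : List Int) : Decidable (Spec_tomyvector vec out) := by unfold Spec_tomyvector; infer_instance

-- ===== CLAIM (what is proved, stated in full; the proofs are below) =====
def Claim_equal_tomyvector : Prop := ∀ (vec : List Int), Dom_tomyvector vec → Spec_tomyvector vec (tomyvector vec)

-- ===== LEMMAS AND PROOFS =====

-- elements that are neither 0 nor 1 do not change A's state
lemma pvStepA_skip (st : List Int × Int) (e : Int) (h0 : e ≠ 0) (h1 : e ≠ 1) :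
    pvStepA st e = st := by
  simp [pvStepA, h0, h1]

lemma foldA_filter (vec : List Int) (st : List Int × Int) :
    vec.foldl pvStepA st = (vec.filter (fun e => e = 0 ∨ e = 1)).foldl pvStepA st := by
  induction vec generalizing st with
  | nil => rfl
  | cons e t ih =>
    by_cases h0 : e = 0
    · simp [List.filter, h0, List.foldl, ih]
    · by_cases h1 : e = 1
      · simp [List.filter, h1, List.foldl, ih]
      · simp [List.filter, h0, h1, List.foldl, pvStepA_skip _ _ h0 h1, ih]

lemma pvGroupRuns_zero (t : List Int) : pvGroupRuns (0 :: t) = pvGroupRuns t := by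
  rw [pvGroupRuns]
  simp only [if_neg (by decide : ¬ (0:Int) = 1)]
  cases t with
  | nil => rfl
  | cons h t' =>
    by_cases hh : h = (0:Int)
    · subst hh
      rw [pvGroupRuns]
      simp
    · simp only [List.dropWhile, beq_eq_false_iff_ne.mpr hh]

lemma pvIncLast_append (acc : List Int) (n : Int) :
    pvIncLast (acc ++ [n]) = acc ++ [n + 1] := by
  induction acc with
  | nil => rfl
  | cons a t ih =>
    cases t with
    | nil => simp [pvIncLast]
    | cons b t' => simpa [pvIncLast] using ih

-- the main invariant, strong induction on the length of the (0/1) list: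
-- from a non-1 last state the fold appends exactly the run lengths;
-- from last = 1 with trailing count n it first extends that count by the
-- leading 1-run, then behaves like the non-1 case.
lemma pvMain (N : Nat) : ∀ l : List Int, l.length ≤ N → (∀ x ∈ l, x = 0 ∨ x = 1) →
    (∀ (acc : List Int) (last : Int), last ≠ 1 →
        (l.foldl pvStepA (acc, last)).1 = acc ++ pvGroupRuns l) ∧
    (∀ (acc : List Int) (n : Int),
        (l.foldl pvStepA (acc ++ [n], 1)).1 =
          acc ++ [n + ((l.takeWhile (fun x => x == (1:Int))).length : Int)]
            ++ pvGroupRuns (l.dropWhile (fun x => x == (1:Int)))) := by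
  induction N with
  | zero =>
    intro l hl _
    have : l = [] := List.length_eq_zero_iff.mp (Nat.le_zero.mp hl)
    subst this
    constructor
    · intro acc last _; simp [pvGroupRuns]
    · intro acc n; simp [pvGroupRuns]
  | succ N ih =>
    intro l hl ok
    cases l with
    | nil =>
      constructor
      · intro acc last _; simp [pvGroupRuns]
      · intro acc n; simp [pvGroupRuns]
    | cons e t =>
      have ht : t.length ≤ N := Nat.le_of_succ_le_succ hl
      have okt : ∀ x ∈ t, x = 0 ∨ x = 1 := fun x hx => ok x (List.mem_cons_of_mem _ hx)
      rcases ok e (List.mem_cons_self ..) with he | he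
      · -- e = 0
        subst he
        constructor
        · intro acc last hlast
          have step : pvStepA (acc, last) 0 = (acc, 0) := by
            by_cases h : last = 0
            · subst h; simp [pvStepA]
            · simp [pvStepA, h]
          rw [List.foldl_cons, step, (ih t ht okt).1 acc 0 (by decide), pvGroupRuns_zero]
        · intro acc n
          have step : pvStepA (acc ++ [n], 1) 0 = (acc ++ [n], 0) := by
            simp [pvStepA]
          rw [List.foldl_cons, step, (ih t ht okt).1 (acc ++ [n]) 0 (by decide)]
          simp [List.takeWhile, List.dropWhile, pvGroupRuns_zero]
      · -- e = 1
        subst he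
        constructor
        · intro acc last hlast
          have step : pvStepA (acc, last) 1 = (acc ++ [1], 1) := by
            simp [pvStepA, hlast]
          rw [List.foldl_cons, step]
          have := (ih t ht okt).2 acc 1
          rw [this, pvGroupRuns]
          simp
        · intro acc n
          have step : pvStepA (acc ++ [n], 1) 1 = (acc ++ [n + 1], 1) := by
            simp [pvStepA, pvIncLast_append]
          rw [List.foldl_cons, step, (ih t ht okt).2 acc (n + 1)]
          simp [List.takeWhile, List.dropWhile]
          ring_nf

-- ===== VERDICT (by name: the statement is the Claim_ definition above) =====
theorem tomyvector_spec : Claim_equal_tomyvector := by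
  intro vec _
  unfold Spec_tomyvector tomyvector tomyvector_alt
  rw [foldA_filter]
  set f := vec.filter (fun e => e = 0 ∨ e = 1) with hf
  have okf : ∀ x ∈ f, x = 0 ∨ x = 1 := by
    intro x hx
    have := List.of_mem_filter hx
    simpa using this
  have := (pvMain f.length f le_rfl okf).1 [] (-1) (by decide)
  simp only [this]
  cases h : pvGroupRuns f <;> simp_all
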